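-- pv_equiv track=rewrite | github.com/0xC1pher/MCP-HUB-V8 | core/advanced_features/code_guardian_mcp.py | _extract_template_block
-- ===== SOURCE A (Python) =====
-- def _extract_template_block(content: str, start_pos: int) -> str:
--     """Extrae un bloque de template Django/Jinja"""
--     # Buscar desde {% block nombre %} hasta {% endblock %}
--     block_content = ""
--     lines = content[start_pos:].split('\n')
--
--     for line in lines:
--         block_content += line + '\n'
--         if '{% endblock %}' in line:
--             break
--
--     return block_content
-- ===== SOURCE B (Python) =====
-- def _extract_template_block(content: str, start_pos: int) -> str:
--     """Extrae un bloque de template Django/Jinja (find/slice instead of line loop)."""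
--     tail = content[start_pos:]
--     idx = tail.find('{% endblock %}')
--     if idx == -1:
--         return tail + '\n'
--     eol = tail.find('\n', idx)
--     if eol == -1:
--         return tail + '\n'
--     return tail[:eol] + '\n'
-- ===== Notes on version B (the rewrite author's own statement) =====
-- stated objective: simpler
-- what changed: Replaces A's split-into-lines loop that accumulates line+'\n' until the endblock marker with a single substring find of the marker, a find of the following newline, and one slice.
import Mathlib
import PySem

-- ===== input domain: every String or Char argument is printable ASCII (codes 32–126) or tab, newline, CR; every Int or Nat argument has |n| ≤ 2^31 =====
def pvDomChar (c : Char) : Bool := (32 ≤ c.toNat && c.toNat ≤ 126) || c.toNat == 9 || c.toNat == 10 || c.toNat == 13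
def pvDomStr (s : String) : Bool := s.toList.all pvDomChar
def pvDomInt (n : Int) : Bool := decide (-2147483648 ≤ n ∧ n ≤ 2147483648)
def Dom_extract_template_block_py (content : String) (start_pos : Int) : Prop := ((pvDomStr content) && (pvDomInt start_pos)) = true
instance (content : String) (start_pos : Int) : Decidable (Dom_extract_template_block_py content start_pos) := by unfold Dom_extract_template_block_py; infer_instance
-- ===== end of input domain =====

-- B replaces A's split-into-lines-and-accumulate loop by one substring find plus one slice; objective: simpler.

-- the marker literal '{% endblock %}' shared by both ports
def pvMarker : List Char := "{% endblock %}".toList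

-- ===== PORT A =====
-- A's loop: block_content += line + '\n'; break once the marker is in the line
def pvALoop (lines : List (List Char)) (acc : List Char) : List Char :=
  match lines with
  | [] => acc
  | l :: ls =>
    let acc' := acc ++ l ++ ['\n']
    if PySem.Chars.isIn pvMarker l then acc' else pvALoop ls acc'

def extract_template_block_py (content : String) (start_pos : Int) : String :=
  String.ofList (pvALoop
    (PySem.Chars.splitOn (PySem.Str.slice content (some start_pos) none).toList ['\n']) [])

-- ===== PORT B =====
def extract_template_block_py_alt (content : String) (start_pos : Int) : String :=
  let tail := (PySem.Str.slice content (some start_pos) none).toList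
  let idx := PySem.Chars.find tail pvMarker
  if idx = -1 then String.ofList (tail ++ ['\n'])
  else
    let eol := PySem.Chars.findFrom tail ['\n'] idx
    if eol = -1 then String.ofList (tail ++ ['\n'])
    else String.ofList (PySem.Chars.slice tail none (some eol) ++ ['\n'])

-- ===== PRECONDITION & SPEC =====
def Spec_extract_template_block_py (content : String) (start_pos : Int) (out : String) : Prop := out = extract_template_block_py_alt content start_pos
instance (content : String) (start_pos : Int) (out : String) : Decidable (Spec_extract_template_block_py content start_pos out) := by unfold Spec_extract_template_block_py; infer_instance

-- ===== CLAIM (what is proved, stated in full; the proofs are below) =====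
def Claim_equal_extract_template_block_py : Prop := ∀ (content : String) (start_pos : Int), Dom_extract_template_block_py content start_pos → Spec_extract_template_block_py content start_pos (extract_template_block_py content start_pos)

-- ===== LEMMAS AND PROOFS =====

lemma pvGoZero (l cur : List Char) (acc : List (List Char)) :
    PySem.Chars.splitOn.go ['\n'] 0 l cur acc = ((cur.reverse ++ l) :: acc).reverse := rfl

lemma pvGoNil (f : Nat) (cur : List Char) (acc : List (List Char)) :
    PySem.Chars.splitOn.go ['\n'] f [] cur acc = (cur.reverse :: acc).reverse := by
  cases f with
  | zero => rw [pvGoZero]; simp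
  | succ f => rfl

lemma pvGoNlCons (f : Nat) (l cur : List Char) (acc : List (List Char)) :
    PySem.Chars.splitOn.go ['\n'] (f+1) ('\n' :: l) cur acc
      = PySem.Chars.splitOn.go ['\n'] f l [] (cur.reverse :: acc) := by
  rw [PySem.Chars.splitOn.go]; simp [List.isPrefixOf]

lemma pvGoCons (f : Nat) (c : Char) (hc : c ≠ '\n') (l cur : List Char) (acc : List (List Char)) :
    PySem.Chars.splitOn.go ['\n'] (f+1) (c :: l) cur acc
      = PySem.Chars.splitOn.go ['\n'] f l (c :: cur) acc := by
  rw [PySem.Chars.splitOn.go]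
  simp [List.isPrefixOf]
  intro h
  exact absurd h.symm hc

lemma pvGoAcc (fuel : Nat) : ∀ (l cur : List Char) (acc : List (List Char)),
    PySem.Chars.splitOn.go ['\n'] fuel l cur acc
      = acc.reverse ++ PySem.Chars.splitOn.go ['\n'] fuel l cur [] := by
  induction fuel with
  | zero => intro l cur acc; rw [pvGoZero, pvGoZero]; simp
  | succ f ih =>
    intro l cur acc
    cases l with
    | nil => rw [pvGoNil, pvGoNil]; simp
    | cons c rest =>
      by_cases hc : c = '\n'
      · subst hc
        rw [pvGoNlCons, pvGoNlCons, ih rest [] (cur.reverse :: acc), ih rest [] [cur.reverse]]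
        simp
      · rw [pvGoCons f c hc, pvGoCons f c hc, ih rest (c :: cur) acc]

lemma pvGoNoNl (l : List Char) (hl : '\n' ∉ l) :
    ∀ (fuel : Nat) (cur : List Char) (acc : List (List Char)), l.length ≤ fuel →
    PySem.Chars.splitOn.go ['\n'] fuel l cur acc = acc.reverse ++ [cur.reverse ++ l] := by
  induction l with
  | nil => intro fuel cur acc _; rw [pvGoNil]; simp
  | cons c rest ih =>
    intro fuel cur acc hf
    cases fuel with
    | zero => simp at hf
    | succ f =>
      have hc : c ≠ '\n' := fun h => hl (h ▸ List.mem_cons_self)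
      rw [pvGoCons f c hc, ih (fun h => hl (List.mem_cons_of_mem _ h)) f (c :: cur) acc (by simpa using hf)]
      simp

lemma pvGoStep (l : List Char) (hl : '\n' ∉ l) (rest : List Char) :
    ∀ (fuel : Nat) (cur : List Char) (acc : List (List Char)), l.length < fuel →
    PySem.Chars.splitOn.go ['\n'] fuel (l ++ '\n' :: rest) cur acc
      = PySem.Chars.splitOn.go ['\n'] (fuel - (l.length + 1)) rest [] ((cur.reverse ++ l) :: acc) := by
  induction l with
  | nil =>
    intro fuel cur acc hf
    cases fuel with
    | zero => simp at hf
    | succ f => rw [List.nil_append, pvGoNlCons]; simp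
  | cons c rest' ih =>
    intro fuel cur acc hf
    cases fuel with
    | zero => simp at hf
    | succ f =>
      have hc : c ≠ '\n' := fun h => hl (h ▸ List.mem_cons_self)
      rw [List.cons_append, pvGoCons f c hc,
        ih (fun h => hl (List.mem_cons_of_mem _ h)) f (c :: cur) acc (by simpa using hf)]
      simp

lemma pvSplitNoNl (cs : List Char) (h : '\n' ∉ cs) :
    PySem.Chars.splitOn cs ['\n'] = [cs] := by
  rw [PySem.Chars.splitOn, pvGoNoNl cs h _ [] [] (by omega)]
  simp

lemma pvSplitCons (l : List Char) (hl : '\n' ∉ l) (rest : List Char) :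
    PySem.Chars.splitOn (l ++ '\n' :: rest) ['\n'] = l :: PySem.Chars.splitOn rest ['\n'] := by
  rw [PySem.Chars.splitOn, pvGoStep l hl rest _ [] [] (by simp)]
  have harith : (l ++ '\n' :: rest).length + 1 - (l.length + 1) = rest.length + 1 := by simp
  rw [harith, pvGoAcc]
  rw [PySem.Chars.splitOn]
  simp



lemma pvPrefixNlAux (m u rest : List Char) (hm : '\n' ∉ m)
    (h : m <+: u ++ '\n' :: rest) : m <+: u := by
  by_cases hlen : m.length ≤ u.length
  · have he := List.prefix_iff_eq_take.1 h
    rw [List.take_append_of_le_length hlen] at he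
    exact he ▸ List.take_prefix _ _
  · exfalso
    apply hm
    have hidx : u.length < m.length := by omega
    have := h.getElem (i := u.length) hidx
    rw [List.getElem_append_right (le_refl _)] at this
    simp at this
    exact this ▸ List.getElem_mem hidx

lemma pvPrefixDropAppend (m l rest : List Char) (hm : '\n' ∉ m) (i : Nat) (hi : i ≤ l.length)
    (h : m <+: (l ++ '\n' :: rest).drop i) : m <+: l.drop i := by
  rw [List.drop_append_of_le_length hi] at h
  exact pvPrefixNlAux m _ rest hm h



lemma pvFindEq (s sub : List Char) (j : Nat) (h1 : sub <+: s.drop j)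
    (h2 : ∀ i < j, ¬ sub <+: s.drop i) : PySem.Chars.find s sub = (j : Int) := by
  have hinf : sub <:+: s := h1.isInfix.trans (List.drop_suffix j s).isInfix
  have hnn : 0 ≤ PySem.Chars.find s sub := (PySem.Chars.find_nonneg_iff s sub).2 hinf
  obtain ⟨p1, p2⟩ := PySem.Chars.find_spec hnn
  have ht : (PySem.Chars.find s sub).toNat = j := by
    by_contra hne
    rcases Nat.lt_or_ge (PySem.Chars.find s sub).toNat j with h | h
    · exact h2 _ h p1
    · exact p2 j (lt_of_le_of_ne h (fun e => hne e.symm)) h1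
  omega

lemma pvInfixOfPrefixDrop {m s : List Char} {i : Nat} (h : m <+: s.drop i) : m <:+: s :=
  h.isInfix.trans (List.drop_suffix i s).isInfix

lemma pvFindNl (u v : List Char) (hu : '\n' ∉ u) :
    PySem.Chars.find (u ++ '\n' :: v) ['\n'] = (u.length : Int) := by
  apply pvFindEq
  · rw [List.drop_append_of_le_length (le_refl _)]
    simp
  · intro i hi hpre
    rw [List.drop_append_of_le_length (le_of_lt hi)] at hpre
    have hne : (u.drop i).length ≠ 0 := by simp; omega
    have h0 : 0 < (['\n'] : List Char).length := by simp
    have := hpre.getElem (i := 0) h0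
    rw [List.getElem_append_left (by omega)] at this
    apply hu
    simp at this
    exact this ▸ List.getElem_mem (by omega)

lemma pvFindInL (l rest : List Char) (hml : pvMarker <:+: l) :
    PySem.Chars.find (l ++ '\n' :: rest) pvMarker = PySem.Chars.find l pvMarker := by
  have hnn : 0 ≤ PySem.Chars.find l pvMarker := (PySem.Chars.find_nonneg_iff l pvMarker).2 hml
  obtain ⟨p1, p2⟩ := PySem.Chars.find_spec hnn
  have hle : (PySem.Chars.find l pvMarker).toNat ≤ l.length := by
    have := PySem.Chars.find_le_length l pvMarker
    omega
  have : PySem.Chars.find (l ++ '\n' :: rest) pvMarker = ((PySem.Chars.find l pvMarker).toNat : Int) := by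
    apply pvFindEq
    · rw [List.drop_append_of_le_length hle]
      exact p1.trans (List.prefix_append _ _)
    · intro i hi hpre
      exact p2 i hi (pvPrefixDropAppend _ _ _ (by decide) i (le_trans (le_of_lt hi) hle) hpre)
  omega

lemma pvFindAfter (l rest : List Char) (hml : ¬ pvMarker <:+: l) :
    PySem.Chars.find (l ++ '\n' :: rest) pvMarker
      = if PySem.Chars.find rest pvMarker = -1 then -1
        else (l.length : Int) + 1 + PySem.Chars.find rest pvMarker := by
  by_cases h : PySem.Chars.find rest pvMarker = -1
  · rw [if_pos h]
    rw [PySem.Chars.find_eq_neg_one_iff]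
    intro hinf
    obtain ⟨j, hj⟩ := (PySem.Chars.exists_prefix_drop_iff_isIn pvMarker _).2
      ((PySem.Chars.isIn_iff_infix pvMarker _).2 hinf)
    by_cases hjl : j ≤ l.length
    · exact hml (pvInfixOfPrefixDrop (pvPrefixDropAppend _ _ _ (by decide) j hjl hj))
    · rw [List.drop_append, List.drop_of_length_le (by omega), List.nil_append] at hj
      have : j - l.length = (j - l.length - 1) + 1 := by omega
      rw [this, List.drop_succ_cons] at hj
      exact (PySem.Chars.find_eq_neg_one_iff rest pvMarker).1 h (pvInfixOfPrefixDrop hj)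
  · rw [if_neg h]
    have hnn : 0 ≤ PySem.Chars.find rest pvMarker := by
      have := PySem.Chars.neg_one_le_find rest pvMarker
      omega
    obtain ⟨p1, p2⟩ := PySem.Chars.find_spec hnn
    have hle : (PySem.Chars.find rest pvMarker).toNat ≤ rest.length := by
      have := PySem.Chars.find_le_length rest pvMarker
      omega
    have heq : PySem.Chars.find (l ++ '\n' :: rest) pvMarker
        = ((l.length + 1 + (PySem.Chars.find rest pvMarker).toNat : Nat) : Int) := by
      apply pvFindEq
      · rw [List.drop_append, List.drop_of_length_le (by omega), List.nil_append]
        have : l.length + 1 + (PySem.Chars.find rest pvMarker).toNat - l.length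
            = (PySem.Chars.find rest pvMarker).toNat + 1 := by omega
        rw [this, List.drop_succ_cons]
        exact p1
      · intro i hi hpre
        by_cases hil : i ≤ l.length
        · exact hml (pvInfixOfPrefixDrop (pvPrefixDropAppend _ _ _ (by decide) i hil hpre))
        · rw [List.drop_append, List.drop_of_length_le (by omega), List.nil_append] at hpre
          have h2 : i - l.length = (i - l.length - 1) + 1 := by omega
          rw [h2, List.drop_succ_cons] at hpre
          exact p2 (i - l.length - 1) (by omega) hpre
    rw [heq]
    omega

def pvB (cs : List Char) : List Char :=
  let idx := PySem.Chars.find cs pvMarker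
  if idx = -1 then cs ++ ['\n']
  else
    let eol := PySem.Chars.findFrom cs ['\n'] idx
    if eol = -1 then cs ++ ['\n']
    else PySem.Chars.slice cs none (some eol) ++ ['\n']

lemma pvALoopAcc (ls : List (List Char)) (acc : List Char) :
    pvALoop ls acc = acc ++ pvALoop ls [] := by
  induction ls generalizing acc with
  | nil => simp [pvALoop]
  | cons l ls ih =>
    simp only [pvALoop]
    by_cases h : PySem.Chars.isIn pvMarker l
    · simp [h]
    · simp only [h, if_false, Bool.false_eq_true]
      rw [ih (acc ++ l ++ ['\n']), ih ([] ++ l ++ ['\n'])]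
      simp

-- no-newline case
lemma pvNoNlCase (cs : List Char) (h : '\n' ∉ cs) :
    pvALoop [cs] [] = pvB cs := by
  have hL : pvALoop [cs] [] = cs ++ ['\n'] := by
    simp only [pvALoop]
    split <;> simp
  rw [hL]
  simp only [pvB]
  by_cases hf : PySem.Chars.find cs pvMarker = -1
  · rw [if_pos hf]
  · rw [if_neg hf]
    have hnn : 0 ≤ PySem.Chars.find cs pvMarker := by
      have := PySem.Chars.neg_one_le_find cs pvMarker; omega
    have hk : (PySem.Chars.find cs pvMarker).toNat ≤ cs.length := by
      have := PySem.Chars.find_le_length cs pvMarker; omega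
    have hcast : PySem.Chars.find cs pvMarker = ((PySem.Chars.find cs pvMarker).toNat : Int) := by omega
    rw [hcast, PySem.Chars.findFrom_natCast cs ['\n'] _ hk]
    have hnl : PySem.Chars.find (cs.drop (PySem.Chars.find cs pvMarker).toNat) ['\n'] = -1 := by
      rw [PySem.Chars.find_eq_neg_one_iff]
      intro hinf
      exact h (List.mem_of_mem_drop (hinf.subset List.mem_cons_self))
    rw [if_pos hnl, if_pos rfl]

lemma pvConsCase (l rest : List Char) (hl : '\n' ∉ l)
    (IH : pvALoop (PySem.Chars.splitOn rest ['\n']) [] = pvB rest) :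
    pvALoop (l :: PySem.Chars.splitOn rest ['\n']) [] = pvB (l ++ '\n' :: rest) := by
  have hlen : (l ++ '\n' :: rest).length = l.length + 1 + rest.length := by simp; omega
  by_cases hml : pvMarker <:+: l
  · -- marker in the first line
    have hL : pvALoop (l :: PySem.Chars.splitOn rest ['\n']) [] = l ++ ['\n'] := by
      simp only [pvALoop, List.nil_append]
      rw [if_pos ((PySem.Chars.isIn_iff_infix pvMarker l).2 hml)]
    rw [hL]
    simp only [pvB]
    have hfind := pvFindInL l rest hml
    have hnn : 0 ≤ PySem.Chars.find l pvMarker := (PySem.Chars.find_nonneg_iff l pvMarker).2 hml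
    have hkl : (PySem.Chars.find l pvMarker).toNat ≤ l.length := by
      have := PySem.Chars.find_le_length l pvMarker; omega
    rw [hfind, if_neg (by omega)]
    have hcast : PySem.Chars.find l pvMarker = ((PySem.Chars.find l pvMarker).toNat : Int) := by omega
    rw [hcast, PySem.Chars.findFrom_natCast _ ['\n'] _ (by rw [hlen]; omega)]
    rw [List.drop_append_of_le_length hkl]
    rw [pvFindNl _ rest (fun hm => hl (List.mem_of_mem_drop hm))]
    rw [if_neg (by omega)]
    have heol : ((PySem.Chars.find l pvMarker).toNat : Int) + ((l.drop (PySem.Chars.find l pvMarker).toNat).length : Int) = (l.length : Int) := by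
      simp; omega
    rw [heol, if_neg (by omega)]
    rw [PySem.Chars.slice_eq_listSlice, PySem.List.slice_to _ (by omega)]
    simp
  · -- marker not in the first line
    have hL : pvALoop (l :: PySem.Chars.splitOn rest ['\n']) []
        = (l ++ ['\n']) ++ pvALoop (PySem.Chars.splitOn rest ['\n']) [] := by
      simp only [pvALoop, List.nil_append]
      rw [if_neg (by simp [PySem.Chars.isIn_iff_infix, hml]), pvALoopAcc]
    rw [hL, IH]
    have hfind := pvFindAfter l rest hml
    by_cases hfr : PySem.Chars.find rest pvMarker = -1
    · rw [if_pos hfr] at hfind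
      have hBr : pvB rest = rest ++ ['\n'] := by simp only [pvB]; rw [if_pos hfr]
      have hBc : pvB (l ++ '\n' :: rest) = (l ++ '\n' :: rest) ++ ['\n'] := by
        simp only [pvB]; rw [if_pos hfind]
      rw [hBr, hBc]; simp
    · rw [if_neg hfr] at hfind
      have hFnn : 0 ≤ PySem.Chars.find rest pvMarker := by
        have := PySem.Chars.neg_one_le_find rest pvMarker; omega
      have hjr : (PySem.Chars.find rest pvMarker).toNat ≤ rest.length := by
        have := PySem.Chars.find_le_length rest pvMarker; omega
      set jn := (PySem.Chars.find rest pvMarker).toNat with hjn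
      -- compute the drop of cs at the found index
      have hk : (l.length + 1 + jn : Nat) ≤ (l ++ '\n' :: rest).length := by rw [hlen]; omega
      have hdrop : (l ++ '\n' :: rest).drop (l.length + 1 + jn) = rest.drop jn := by
        rw [List.drop_append, List.drop_of_length_le (by omega), List.nil_append]
        have : l.length + 1 + jn - l.length = jn + 1 := by omega
        rw [this, List.drop_succ_cons]
      set r := PySem.Chars.find (rest.drop jn) ['\n'] with hr
      have hrge : -1 ≤ r := PySem.Chars.neg_one_le_find _ _
      -- pvB rest
      have hcastF : PySem.Chars.find rest pvMarker = (jn : Int) := by omega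
      have hBr : pvB rest
          = if r = -1 then rest ++ ['\n']
            else rest.take (jn + r.toNat) ++ ['\n'] := by
        simp only [pvB]
        rw [if_neg hfr, hcastF, PySem.Chars.findFrom_natCast _ ['\n'] _ hjr, ← hr]
        by_cases hrneg : r = -1
        · rw [if_pos hrneg, if_pos hrneg, if_pos rfl]
        · rw [if_neg hrneg, if_neg hrneg, if_neg (by omega)]
          rw [PySem.Chars.slice_eq_listSlice, PySem.List.slice_to _ (by omega)]
          congr 2
          omega
      -- pvB cs
      have hBc : pvB (l ++ '\n' :: rest)
          = if r = -1 then (l ++ '\n' :: rest) ++ ['\n']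
            else (l ++ '\n' :: rest).take (l.length + 1 + jn + r.toNat) ++ ['\n'] := by
        simp only [pvB]
        rw [hfind, if_neg (by omega)]
        have hcast2 : (l.length : Int) + 1 + PySem.Chars.find rest pvMarker
            = ((l.length + 1 + jn : Nat) : Int) := by push_cast; omega
        rw [hcast2, PySem.Chars.findFrom_natCast _ ['\n'] _ hk, hdrop, ← hr]
        by_cases hrneg : r = -1
        · rw [if_pos hrneg, if_pos hrneg, if_pos rfl]
        · rw [if_neg hrneg, if_neg hrneg, if_neg (by omega)]
          rw [PySem.Chars.slice_eq_listSlice, PySem.List.slice_to _ (by omega)]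
          congr 2
          omega
      rw [hBr, hBc]
      by_cases hrneg : r = -1
      · rw [if_pos hrneg, if_pos hrneg]; simp
      · rw [if_neg hrneg, if_neg hrneg]
        rw [List.take_append,
          List.take_of_length_le (show l.length ≤ l.length + 1 + jn + r.toNat by omega)]
        have h1 : l.length + 1 + jn + r.toNat - l.length = (jn + r.toNat) + 1 := by omega
        rw [h1, List.take_succ_cons]
        simp

lemma pvDropWhileHead {p : Char → Bool} : ∀ {cs ds : List Char} {ch : Char},
    List.dropWhile p cs = ch :: ds → p ch = false := by
  intro cs
  induction cs with
  | nil => intro ds ch h; simp [List.dropWhile] at h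
  | cons x xs ih =>
    intro ds ch h
    rw [List.dropWhile_cons] at h
    by_cases hx : p x
    · rw [if_pos hx] at h; exact ih h
    · rw [if_neg hx] at h
      cases h
      simpa using hx

lemma pvMain : ∀ (n : Nat) (cs : List Char), cs.length ≤ n →
    pvALoop (PySem.Chars.splitOn cs ['\n']) [] = pvB cs := by
  intro n
  induction n with
  | zero =>
    intro cs hcs
    have : cs = [] := List.eq_nil_of_length_eq_zero (by omega)
    subst this
    rw [pvSplitNoNl [] (by simp)]
    exact pvNoNlCase [] (by simp)
  | succ n ih =>
    intro cs hcs
    by_cases h : '\n' ∈ cs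
    · -- split cs at the first newline
      set l := cs.takeWhile (fun c => decide (c ≠ '\n')) with hldef
      have hd : cs.dropWhile (fun c => decide (c ≠ '\n')) ≠ [] := by
        intro hnil
        have := List.dropWhile_eq_nil_iff.1 hnil '\n' h
        simp at this
      obtain ⟨c, ds, hds⟩ := List.exists_cons_of_ne_nil hd
      have hc : c = '\n' := by
        have h2 := pvDropWhileHead hds
        simpa using h2
      subst hc
      have hcs' : cs = l ++ '\n' :: ds := by
        rw [hldef, ← hds, List.takeWhile_append_dropWhile]
      have hl : '\n' ∉ l := by
        intro hm
        have := List.mem_takeWhile_imp hm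
        simp at this
      have hds_len : ds.length ≤ n := by
        have : cs.length = l.length + 1 + ds.length := by rw [hcs']; simp; omega
        omega
      rw [hcs', pvSplitCons l hl ds]
      exact pvConsCase l ds hl (ih ds hds_len)
    · rw [pvSplitNoNl cs h]
      exact pvNoNlCase cs h

lemma pvAltEq (content : String) (start_pos : Int) :
    extract_template_block_py_alt content start_pos
      = String.ofList (pvB (PySem.Str.slice content (some start_pos) none).toList) := by
  unfold extract_template_block_py_alt pvB
  by_cases h1 : PySem.Chars.find (PySem.Str.slice content (some start_pos) none).toList pvMarker = -1
  · simp only [h1, if_true]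
  · by_cases h2 : PySem.Chars.findFrom (PySem.Str.slice content (some start_pos) none).toList ['\n'] (PySem.Chars.find (PySem.Str.slice content (some start_pos) none).toList pvMarker) = -1
    · simp only [h1, h2, if_false, if_true]
    · simp only [h1, h2, if_false]

theorem extract_template_block_py_eq_alt (content : String) (start_pos : Int) :
    extract_template_block_py content start_pos = extract_template_block_py_alt content start_pos := by
  rw [extract_template_block_py, pvAltEq,
    pvMain (PySem.Str.slice content (some start_pos) none).toList.length _ le_rfl]

-- ===== VERDICT (by name: the statement is the Claim_ definition above) =====
theorem extract_template_block_py_spec : Claim_equal_extract_template_block_py := by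
  intro content start_pos _
  exact extract_template_block_py_eq_alt content start_pos
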